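-- pv_equiv track=rewrite | github.com/DanaSwitch/leetcode | HWod/DynamicProgramming/divide_mooncakes.py | solve
-- ===== SOURCE A (Python) =====
-- def solve(m, n):
--     memo = {}
--
--     def dp(emp_left, moon_left, prev):  # 还需要分给多少个员工, 剩余月饼数, 上一个人分了多少月饼
--         if emp_left == 0:
--             # 剩余月饼数为0说明刚好分完, 属于一种方案
--             return 1 if moon_left == 0 else 0
--
--         key = (emp_left, moon_left, prev)
--         if key in memo:
--             return memo[key]
--
--         min_cur = max(1, prev - 3)  # 最少分1, 且比前一人不低于3个
--         max_cur = min(prev, moon_left - (emp_left - 1))  # 最多不超过前一个, 且后序每人至少一个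
--         # 不能按要分配
--         if min_cur > max_cur:
--             memo[key] = 0
--             return 0
--
--         result = 0
--         for cur in range(min_cur, max_cur + 1):
--             result += dp(emp_left - 1, moon_left - cur, cur)
--         # 记录
--         memo[key] = result
--         return result
--
--     total = 0
--     max_first = n - (m - 1)
--     # 穷举: 假设第一个人拿了1, 2, 3, ..., n-(m-1)个
--     for first in range(1, max_first + 1):
--         total += dp(m - 1, n - first, first)
--
--     return total
-- ===== SOURCE B (Python) =====
-- def solve(m, n):
--     # Difference transform: a solution is a non-increasing sequence a_1..a_m,
--     # a_i >= 1, a_i - a_{i+1} <= 3, sum n.  With k = a_m >= 1 and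
--     # d_t = a_t - a_{t+1} in {0,1,2,3}, the total is  m*k + sum_t t*d_t = n.
--     # Count d-vectors by a 1-D knapsack over the weighted sum, then sum over k.
--     if m < 1 or n < m:
--         return 0
--     S = n - m
--     ways = [0] * (S + 1)
--     ways[0] = 1
--     for i in range(1, m):
--         if i > S:
--             break
--         ways = [sum(ways[s - d * i] for d in range(4) if d * i <= s)
--                 for s in range(S + 1)]
--     return sum(ways[n - m * k] for k in range(1, n // m + 1))
-- ===== Notes on version B (the rewrite author's own statement) =====
-- stated objective: alternative
-- what changed: Replaces the top-down memoized recursion over states (emp_left, moon_left, prev) by a 1-D knapsack over the difference transform of the non-increasing sequence (d_t = a_t - a_{t+1} in 0..3, weight t), then sums the table over the value of the last share; no recursion, no memo dict, O(n-m) memory.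
import Mathlib
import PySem

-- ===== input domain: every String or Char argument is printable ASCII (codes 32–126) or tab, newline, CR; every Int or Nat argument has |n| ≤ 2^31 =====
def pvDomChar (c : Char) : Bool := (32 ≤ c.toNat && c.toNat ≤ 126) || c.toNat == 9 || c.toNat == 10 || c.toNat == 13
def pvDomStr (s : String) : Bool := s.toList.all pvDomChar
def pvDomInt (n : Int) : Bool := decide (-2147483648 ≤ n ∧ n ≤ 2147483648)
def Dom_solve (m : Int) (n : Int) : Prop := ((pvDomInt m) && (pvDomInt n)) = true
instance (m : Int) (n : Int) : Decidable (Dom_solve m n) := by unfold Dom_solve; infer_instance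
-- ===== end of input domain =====

-- B replaces A's memoized recursion over states by a 1-D knapsack over the
-- difference transform of the non-increasing sequence (an alternative algorithm).

-- ===== PORT A =====
-- A's inner `dp(emp_left, moon_left, prev)` threads the memo dict through the
-- computation; `emp_left` is carried as a Nat fuel (faithful exactly where
-- emp_left ≥ 0, which holds along every call A makes under Pre_solve).  The memo
-- is ported as a hash map: A only gets and inserts (never iterates) it, for
-- which Std.HashMap is exact for Python's dict.
mutual
def dpA (fuel : Nat) (moonLeft : Int) (prev : Int)
    (memo : Std.HashMap (Int × Int × Int) Int) : Int × Std.HashMap (Int × Int × Int) Int :=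
  match fuel with
  | 0 => (if moonLeft = 0 then 1 else 0, memo)
  | e + 1 =>
    let key : Int × Int × Int := ((e : Int) + 1, moonLeft, prev)
    match memo[key]? with
    | some v => (v, memo)
    | none =>
      let minCur : Int := max 1 (prev - 3)
      let maxCur : Int := min prev (moonLeft - ((e : Int) + 1 - 1))
      if minCur > maxCur then (0, memo.insert key 0)
      else
        let res := dpALoop e moonLeft (PySem.List.pyRange minCur (maxCur + 1) 1) 0 memo
        (res.1, res.2.insert key res.1)
termination_by (fuel + 1, 0)

def dpALoop (e : Nat) (moonLeft : Int) (curs : List Int) (acc : Int)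
    (memo : Std.HashMap (Int × Int × Int) Int) : Int × Std.HashMap (Int × Int × Int) Int :=
  match curs with
  | [] => (acc, memo)
  | c :: cs =>
    let r := dpA e (moonLeft - c) c memo
    dpALoop e moonLeft cs (acc + r.1) r.2
termination_by (e + 1, curs.length + 1)
end

def solve (m : Int) (n : Int) : Int :=
  let maxFirst := n - (m - 1)
  ((PySem.List.pyRange 1 (maxFirst + 1) 1).foldl
    (fun (st : Int × Std.HashMap (Int × Int × Int) Int) first =>
      let r := dpA (m - 1).toNat (n - first) first st.2
      (st.1 + r.1, r.2))
    (0, ∅)).1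

-- ===== PORT B =====
-- Source B's 'for i in range(1, m): if i > S: break' runs i = 1 .. min(m-1, S),
-- which is exactly pyRange 1 (min m (S+1)); the rest is step for step.
def solve_alt (m : Int) (n : Int) : Int :=
  if m < 1 || n < m then 0
  else
    -- S = n - m (Source B's name for the weighted-sum budget), written out below
    ((PySem.List.pyRange 1 (PySem.Int.floordiv n m + 1) 1).map
      (fun k => PySem.List.pyGetD
        ((PySem.List.pyRange 1 (min m ((n - m) + 1)) 1).foldl
          (fun ways i =>
            (PySem.List.pyRange 0 ((n - m) + 1) 1).map (fun s =>
              (((PySem.List.pyRange 0 4 1).filter (fun d => decide (d * i ≤ s))).map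
                (fun d => PySem.List.pyGetD ways (s - d * i) 0)).sum))
          (PySem.List.pySetD (PySem.List.pyRepeat [0] ((n - m) + 1)) 0 1))
        (n - m * k) 0)).sum

-- ===== PRECONDITION & SPEC =====
-- Pre_ excludes exactly the inputs on which A raises: for m ≤ 0 with n ≥ m the
-- outer loop is non-empty and calls dp with emp_left = m-1 < 0, which never
-- reaches the emp_left == 0 base case, so A raises RecursionError there.
def Pre_solve (m : Int) (n : Int) : Prop := 1 ≤ m ∨ n < m
instance (m : Int) (n : Int) : Decidable (Pre_solve m n) := by unfold Pre_solve; infer_instance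
def pvWitness_solve : Int × Int := (3, 10)

def Spec_solve (m : Int) (n : Int) (out : Int) : Prop := out = solve_alt m n
instance (m : Int) (n : Int) (out : Int) : Decidable (Spec_solve m n out) := by unfold Spec_solve; infer_instance

-- ===== CLAIM (what is proved, stated in full; the proofs are below) =====
def Claim_equal_solve : Prop := ∀ (m : Int) (n : Int), Dom_solve m n → Pre_solve m n → Spec_solve m n (solve m n)

-- ===== LEMMAS AND PROOFS =====

-- ---- A-side: the memoized recursion computes the memo-free value gSpec ----

def gSpec : Nat → Int → Int → Int
  | 0, moon, _ => if moon = 0 then 1 else 0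
  | e + 1, moon, prev =>
      ((PySem.List.pyRange (max 1 (prev - 3)) (min prev (moon - e) + 1) 1).map
        (fun cur => gSpec e (moon - cur) cur)).sum

def MemoOK (memo : Std.HashMap (Int × Int × Int) Int) : Prop :=
  ∀ (e : Nat) (moon prev v : Int),
    memo[((e : Int) + 1, moon, prev)]? = some v → v = gSpec (e + 1) moon prev

theorem memoOK_insert (memo : Std.HashMap (Int × Int × Int) Int) (h : MemoOK memo)
    (e : Nat) (moon prev : Int) :
    MemoOK (memo.insert ((e : Int) + 1, moon, prev) (gSpec (e + 1) moon prev)) := by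
  intro e' moon' prev' v hv
  by_cases hk : ((e' : Int) + 1, moon', prev') = ((e : Int) + 1, moon, prev)
  · simp only [Prod.mk.injEq] at hk
    obtain ⟨h1, h2, h3⟩ := hk
    have he : e' = e := by omega
    subst he; subst h2; subst h3
    rw [Std.HashMap.getElem?_insert_self] at hv
    exact (Option.some.inj hv).symm
  · rw [Std.HashMap.getElem?_insert,
      if_neg (by simp only [beq_iff_eq]; exact fun hh => hk (Eq.symm hh))] at hv
    exact h e' moon' prev' v hv

theorem dpA_ok : ∀ (e : Nat) (moon prev : Int) (memo : Std.HashMap (Int × Int × Int) Int),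
    MemoOK memo →
    (dpA e moon prev memo).1 = gSpec e moon prev ∧ MemoOK (dpA e moon prev memo).2 := by
  intro e
  induction e with
  | zero =>
    intro moon prev memo h
    constructor
    · simp [dpA, gSpec]
    · simpa [dpA] using h
  | succ e ih =>
    have loop : ∀ (curs : List Int) (moon acc : Int)
        (memo : Std.HashMap (Int × Int × Int) Int), MemoOK memo →
        (dpALoop e moon curs acc memo).1
          = acc + (curs.map (fun c => gSpec e (moon - c) c)).sum ∧
        MemoOK (dpALoop e moon curs acc memo).2 := by
      intro curs
      induction curs with
      | nil => intro moon acc memo h; exact ⟨by simp [dpALoop], by simpa [dpALoop] using h⟩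
      | cons c cs ihc =>
        intro moon acc memo h
        have hd := ih (moon - c) c memo h
        have ht := ihc moon (acc + (dpA e (moon - c) c memo).1) ((dpA e (moon - c) c memo).2) hd.2
        refine ⟨?_, by simpa [dpALoop] using ht.2⟩
        simp only [dpALoop]
        rw [ht.1, hd.1]
        simp [List.sum_cons]
        ring
    intro moon prev memo h
    cases hget : memo[((e : Int) + 1, moon, prev)]? with
    | some v =>
      have hv := h e moon prev v hget
      constructor
      · simp [dpA, hget, hv]
      · simpa [dpA, hget] using h
    | none =>
      by_cases hc : max 1 (prev - 3) > min prev (moon - ((e : Int) + 1 - 1))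
      · have hnil : PySem.List.pyRange (max 1 (prev - 3)) (min prev (moon - (e : Int)) + 1) 1 = [] :=
          PySem.List.pyRange_one_eq_nil (by omega)
        have hg : gSpec (e + 1) moon prev = 0 := by
          simp [gSpec, hnil]
        have hins := memoOK_insert memo h e moon prev
        rw [hg] at hins
        constructor
        · simp only [dpA, hget]
          simp only [gt_iff_lt, lt_max_iff, min_lt_iff]
          rw [if_pos (by omega)]
          simpa using hg.symm
        · simp only [dpA, hget]
          simp only [gt_iff_lt, lt_max_iff, min_lt_iff]
          rw [if_pos (by omega)]
          exact hins
      · have hl := loop (PySem.List.pyRange (max 1 (prev - 3))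
            (min prev (moon - ((e : Int) + 1 - 1)) + 1) 1) moon 0 memo h
        simp only [add_sub_cancel_right] at hl
        have hres : (dpALoop e moon (PySem.List.pyRange (max 1 (prev - 3))
            (min prev (moon - (e : Int)) + 1) 1) 0 memo).1 = gSpec (e + 1) moon prev := by
          rw [hl.1]
          simp [gSpec]
        have hins := memoOK_insert (dpALoop e moon (PySem.List.pyRange (max 1 (prev - 3))
              (min prev (moon - (e : Int)) + 1) 1) 0 memo).2 hl.2 e moon prev
        rw [← hres] at hins
        constructor
        · simp only [dpA, hget]
          simp only [gt_iff_lt, lt_max_iff, min_lt_iff]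
          rw [if_neg (by omega)]
          simpa only [add_sub_cancel_right] using hres
        · simp only [dpA, hget]
          simp only [gt_iff_lt, lt_max_iff, min_lt_iff]
          rw [if_neg (by omega)]
          simpa only [add_sub_cancel_right] using hins

theorem solveA_eq (m n : Int) :
    solve m n = ((PySem.List.pyRange 1 (n - (m - 1) + 1) 1).map
      (fun first => gSpec (m - 1).toNat (n - first) first)).sum := by
  have fold : ∀ (L : List Int) (acc : Int) (memo : Std.HashMap (Int × Int × Int) Int),
      MemoOK memo →
      (L.foldl (fun (st : Int × Std.HashMap (Int × Int × Int) Int) first =>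
          let r := dpA (m - 1).toNat (n - first) first st.2
          (st.1 + r.1, r.2)) (acc, memo)).1
        = acc + (L.map (fun first => gSpec (m - 1).toNat (n - first) first)).sum ∧
      MemoOK (L.foldl (fun (st : Int × Std.HashMap (Int × Int × Int) Int) first =>
          let r := dpA (m - 1).toNat (n - first) first st.2
          (st.1 + r.1, r.2)) (acc, memo)).2 := by
    intro L
    induction L with
    | nil => intro acc memo h; exact ⟨by simp, by simpa using h⟩
    | cons c cs ihc =>
      intro acc memo h
      have hd := dpA_ok (m - 1).toNat (n - c) c memo h
      have ht := ihc (acc + (dpA (m - 1).toNat (n - c) c memo).1)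
        ((dpA (m - 1).toNat (n - c) c memo).2) hd.2
      refine ⟨?_, by simpa using ht.2⟩
      simp only [List.foldl_cons]
      rw [ht.1, hd.1]
      simp [List.sum_cons]
      ring
  have hempty : MemoOK (∅ : Std.HashMap (Int × Int × Int) Int) := by
    intro e moon prev v hv
    simp at hv
  simpa [solve] using (fold (PySem.List.pyRange 1 (n - (m - 1) + 1) 1) 0 ∅ hempty).1

-- ---- B-side: the table of the knapsack loop is the memo-free count W ----

-- counts of d-vectors (d_1..d_i) in [0,3]^i with sum_t t*d_t = s (B's table value)
def W : Nat → Int → Int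
  | 0, s => if s = 0 then 1 else 0
  | i + 1, s =>
      (((PySem.List.pyRange 0 4 1).filter (fun d => decide (d * ((i : Int) + 1) ≤ s))).map
        (fun d => W i (s - d * ((i : Int) + 1)))).sum

def stepW (S : Int) (ways : List Int) (i : Int) : List Int :=
  (PySem.List.pyRange 0 (S + 1) 1).map (fun s =>
    (((PySem.List.pyRange 0 4 1).filter (fun d => decide (d * i ≤ s))).map
      (fun d => PySem.List.pyGetD ways (s - d * i) 0)).sum)

def WaysOK (S : Int) (t : Nat) (ways : List Int) : Prop :=
  ∀ s : Int, 0 ≤ s → s ≤ S → PySem.List.pyGetD ways s 0 = W t s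

theorem ways0_ok (S : Int) (_hS : 0 ≤ S) :
    WaysOK S 0 (PySem.List.pySetD (PySem.List.pyRepeat [0] (S + 1)) 0 1) := by
  intro s hs0 hsS
  have hrep : PySem.List.pyRepeat ([0] : List Int) (S + 1) = List.replicate (S + 1).toNat 0 :=
    PySem.List.pyRepeat_singleton 0 (S + 1)
  rw [hrep, PySem.List.pySetD_of_nonneg _ _ (le_refl (0 : Int))]
  rw [PySem.List.pyGetD_eq_getElem _ _ hs0 (by simp; omega)]
  rcases eq_or_ne s 0 with rfl | hne
  · simp [W]
  · have hst : s.toNat ≠ ((0 : Int).toNat : Nat) := by omega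
    rw [List.getElem_set_ne (by simpa using hst.symm)]
    simp [W, hne]

theorem stepW_ok (S : Int) (t : Nat) (ways : List Int)
    (h : WaysOK S t ways) : WaysOK S (t + 1) (stepW S ways ((t : Int) + 1)) := by
  intro s hs0 hsS
  unfold stepW
  rw [PySem.List.pyGetD_map_pyRange_of_nonneg _ (S + 1) s _ hs0 (by omega)]
  rw [W]
  congr 1
  refine List.map_congr_left ?_
  intro d hd
  rw [List.mem_filter] at hd
  obtain ⟨hdr, hds⟩ := hd
  rw [PySem.List.mem_pyRange_one] at hdr
  have hds' : d * ((t : Int) + 1) ≤ s := by simpa using hds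
  exact h (s - d * ((t : Int) + 1)) (by omega) (by nlinarith [hdr.1]) 

theorem fold_ways_ok (S : Int) (hS : 0 ≤ S) : ∀ t : Nat,
    WaysOK S t ((PySem.List.pyRange 1 ((t : Int) + 1) 1).foldl (stepW S)
      (PySem.List.pySetD (PySem.List.pyRepeat [0] (S + 1)) 0 1)) := by
  intro t
  induction t with
  | zero =>
    have h0 : PySem.List.pyRange 1 (((0 : Nat) : Int) + 1) 1 = [] :=
      PySem.List.pyRange_one_eq_nil (by omega)
    rw [h0, List.foldl_nil]
    exact ways0_ok S hS
  | succ t ih =>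
    have hsplit : PySem.List.pyRange 1 ((t : Int) + 1 + 1) 1
        = PySem.List.pyRange 1 ((t : Int) + 1) 1 ++ [(t : Int) + 1] :=
      PySem.List.pyRange_one_succ_right (a := 1) (b := (t : Int) + 1) (by omega)
    push_cast
    rw [hsplit, List.foldl_append, List.foldl_cons, List.foldl_nil]
    exact stepW_ok S t _ ih

-- W is stable in its first argument once it exceeds the weight budget
theorem W_stab (i : Nat) (s : Int) (hs0 : 0 ≤ s) (hsi : s ≤ (i : Int)) :
    W (i + 1) s = W i s := by
  rw [W]
  have h04 : PySem.List.pyRange 0 4 1 = [0, 1, 2, 3] := by decide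
  rw [h04]
  simp only [List.filter_cons, List.filter_nil, decide_eq_true_eq]
  rw [if_pos (by omega), if_neg (by omega), if_neg (by nlinarith), if_neg (by nlinarith)]
  simp

theorem W_stable (a : Nat) : ∀ (b : Nat), a ≤ b → ∀ s : Int, 0 ≤ s → s ≤ (a : Int) →
    W b s = W a s := by
  intro b
  induction b with
  | zero => intro hab s _ _; have : a = 0 := by omega
            subst this; rfl
  | succ b ih =>
    intro hab s hs0 hsa
    rcases eq_or_lt_of_le hab with rfl | hlt
    · rfl
    · have hab' : a ≤ b := by omega
      rw [W_stab b s hs0 (by exact_mod_cast le_trans hsa (by exact_mod_cast hab'))]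
      exact ih hab' s hs0 hsa

theorem solveB_eq (m n : Int) (hm : 1 ≤ m) (hn : m ≤ n) :
    solve_alt m n = ((PySem.List.pyRange 1 (PySem.Int.floordiv n m + 1) 1).map
      (fun k => W (m - 1).toNat (n - m * k))).sum := by
  unfold solve_alt
  rw [if_neg (by simp; omega)]
  have hS : (0 : Int) ≤ n - m := by omega
  have hb : min m (n - m + 1) = min (m - 1) (n - m) + 1 := by omega
  set T : Int := min (m - 1) (n - m) with hT
  have hT0 : 0 ≤ T := by omega
  have hrange : PySem.List.pyRange 1 (min m (n - m + 1)) 1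
      = PySem.List.pyRange 1 ((T.toNat : Int) + 1) 1 := by
    rw [hb]; congr 1; omega
  have hways := fold_ways_ok (n - m) hS T.toNat
  rw [hrange]
  congr 1
  refine List.map_congr_left ?_
  intro k hk
  rw [PySem.List.mem_pyRange_one] at hk
  have hkm : k * m ≤ n := (PySem.Int.le_floordiv_iff_mul_le (by omega)).mp (by omega)
  have hs0 : 0 ≤ n - m * k := by nlinarith
  have hsS : n - m * k ≤ n - m := by nlinarith
  -- W T.toNat = W (m-1).toNat at this index (stability when the loop broke early)
  have hW : W T.toNat (n - m * k) = W (m - 1).toNat (n - m * k) := by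
    by_cases hc : m - 1 ≤ n - m
    · have hTe : T = m - 1 := by omega
      rw [hTe]
    · exact (W_stable T.toNat (m - 1).toNat (by omega) (n - m * k) hs0 (by omega)).symm
  exact (hways (n - m * k) hs0 hsS).trans hW

-- ---- the combinatorial objects both sides count ----

-- the chains A's dp counts: (a_1..a_e) with prev-3 ≤ a_1 ≤ prev, steps down ≤ 3, ≥ 1, sum moon
def chains : Nat → Int → Int → List (List Int)
  | 0, moon, _ => if moon = 0 then [[]] else []
  | e + 1, moon, prev =>
      (PySem.List.pyRange (max 1 (prev - 3)) (min prev (moon - e) + 1) 1).flatMap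
        (fun cur => (chains e (moon - cur) cur).map (cur :: ·))

-- the d-vectors W counts, as lists [d_1, …, d_i] (weight of d_t is t)
def dvecs : Nat → Int → List (List Int)
  | 0, s => if s = 0 then [[]] else []
  | i + 1, s =>
      ((PySem.List.pyRange 0 4 1).filter (fun d => decide (d * ((i : Int) + 1) ≤ s))).flatMap
        (fun d => (dvecs i (s - d * ((i : Int) + 1))).map (· ++ [d]))

def ChainP : Int → Int → List Int → Prop
  | _, moon, [] => moon = 0
  | prev, moon, a :: t => prev - 3 ≤ a ∧ a ≤ prev ∧ 1 ≤ a ∧ ChainP a (moon - a) t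

-- the step bounds alone (no sum condition)
def ChainB : Int → List Int → Prop
  | _, [] => True
  | prev, a :: t => prev - 3 ≤ a ∧ a ≤ prev ∧ 1 ≤ a ∧ ChainB a t

-- weighted sum: wsum [d_1, …, d_j] = Σ t·d_t
def wsum : List Int → Int
  | [] => 0
  | d :: u => d + wsum u + u.sum

-- [a_1, …, a_m] ↦ [a_1-a_2, …, a_{m-1}-a_m, a_m]
def phiT : List Int → List Int
  | [] => []
  | [a] => [a]
  | a :: b :: t => (a - b) :: phiT (b :: t)

def psiT : List Int → List Int
  | [] => []
  | [k] => [k]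
  | d :: w :: t => (d + (psiT (w :: t)).headD 0) :: psiT (w :: t)

def LA (j : Nat) (n : Int) : List (List Int) :=
  (PySem.List.pyRange 1 (n - (j : Int) + 1) 1).flatMap
    (fun f => (chains j (n - f) f).map (f :: ·))

def LB (j : Nat) (mI : Int) (n : Int) : List (List Int) :=
  (PySem.List.pyRange 1 (PySem.Int.floordiv n mI + 1) 1).flatMap
    (fun k => (dvecs j (n - mI * k)).map (· ++ [k]))

theorem gSpec_len (e : Nat) : ∀ (moon prev : Int),
    gSpec e moon prev = ((chains e moon prev).length : Int) := by
  induction e with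
  | zero => intro moon prev; by_cases h : moon = 0 <;> simp [gSpec, chains, h]
  | succ e ih =>
    intro moon prev
    rw [gSpec, chains, List.length_flatMap]
    rw [List.map_congr_left (fun cur _ => ih (moon - cur) cur)]
    rw [Nat.cast_list_sum, List.map_map]
    congr 1
    refine List.map_congr_left ?_
    intro cur _
    simp

theorem W_len (i : Nat) : ∀ (s : Int), W i s = ((dvecs i s).length : Int) := by
  induction i with
  | zero => intro s; by_cases h : s = 0 <;> simp [W, dvecs, h]
  | succ i ih =>
    intro s
    rw [W, dvecs, List.length_flatMap]
    rw [List.map_congr_left (fun d _ => ih (s - d * ((i : Int) + 1)))]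
    rw [Nat.cast_list_sum, List.map_map]
    congr 1
    refine List.map_congr_left ?_
    intro d _
    simp

theorem chainP_len_le : ∀ (x : List Int) (prev moon : Int),
    ChainP prev moon x → (x.length : Int) ≤ moon := by
  intro x
  induction x with
  | nil => intro prev moon h; simp [ChainP] at h; simp [h]
  | cons a t ih =>
    intro prev moon h
    obtain ⟨_, _, ha, hc⟩ := h
    have := ih a (moon - a) hc
    simp only [List.length_cons]
    push_cast
    omega

theorem chainP_iff : ∀ (x : List Int) (prev moon : Int),
    ChainP prev moon x ↔ (x.sum = moon ∧ ChainB prev x) := by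
  intro x
  induction x with
  | nil => intro prev moon; simp [ChainP, ChainB, eq_comm]
  | cons a t ih =>
    intro prev moon
    simp only [ChainP, ChainB, ih a (moon - a), List.sum_cons]
    constructor
    · rintro ⟨h1, h2, h3, h4, h5⟩
      exact ⟨by omega, h1, h2, h3, h5⟩
    · rintro ⟨h0, h1, h2, h3, h5⟩
      exact ⟨h1, h2, h3, by omega, h5⟩

theorem mem_chains (e : Nat) : ∀ (moon prev : Int) (x : List Int),
    x ∈ chains e moon prev ↔ (x.length = e ∧ ChainP prev moon x) := by
  induction e with
  | zero =>
    intro moon prev x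
    by_cases h : moon = 0
    · subst h
      constructor
      · intro hx; simp [chains] at hx; simp [hx, ChainP]
      · rintro ⟨h1, _⟩
        have : x = [] := List.eq_nil_of_length_eq_zero h1
        simp [chains, this]
    · constructor
      · intro hx; simp [chains, h] at hx
      · rintro ⟨h1, h2⟩
        have : x = [] := List.eq_nil_of_length_eq_zero h1
        subst this
        simp [ChainP] at h2
        omega
  | succ e ih =>
    intro moon prev x
    constructor
    · intro hx
      rw [chains, List.mem_flatMap] at hx
      obtain ⟨cur, hcur, hmem⟩ := hx
      rw [PySem.List.mem_pyRange_one] at hcur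
      rw [List.mem_map] at hmem
      obtain ⟨y, hy, rfl⟩ := hmem
      obtain ⟨hylen, hyP⟩ := (ih (moon - cur) cur y).mp hy
      refine ⟨by simp [hylen], ?_⟩
      exact ⟨by omega, by omega, by omega, hyP⟩
    · rintro ⟨hlen, hP⟩
      cases x with
      | nil => simp at hlen
      | cons a t =>
        obtain ⟨h1, h2, h3, h4⟩ := hP
        have hlt : (t.length : Int) ≤ moon - a := chainP_len_le t a (moon - a) h4
        rw [chains, List.mem_flatMap]
        refine ⟨a, ?_, ?_⟩
        · rw [PySem.List.mem_pyRange_one]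
          have hte : t.length = e := by simpa using hlen
          constructor
          · omega
          · have : (e : Int) ≤ moon - a := by rw [← hte]; exact hlt
            omega
        · rw [List.mem_map]
          exact ⟨t, (ih (moon - a) a t).mpr ⟨by simpa using hlen, h4⟩, rfl⟩

theorem wsum_append : ∀ (u : List Int) (d : Int),
    wsum (u ++ [d]) = wsum u + ((u.length : Int) + 1) * d := by
  intro u
  induction u with
  | nil => intro d; simp [wsum]
  | cons c u ih =>
    intro d
    simp only [List.cons_append, wsum, ih, List.sum_append, List.sum_cons, List.sum_nil,
      List.length_cons]
    push_cast
    ring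

theorem wsum_nonneg : ∀ (u : List Int), (∀ d ∈ u, 0 ≤ d) → 0 ≤ wsum u := by
  intro u
  induction u with
  | nil => intro _; simp [wsum]
  | cons c u ih =>
    intro h
    have h1 : 0 ≤ c := h c (by simp)
    have h2 : 0 ≤ wsum u := ih (fun d hd => h d (by simp [hd]))
    have h3 : 0 ≤ u.sum := List.sum_nonneg (fun d hd => h d (by simp [hd]))
    simp only [wsum]
    omega

theorem mem_dvecs (i : Nat) : ∀ (s : Int) (u : List Int),
    u ∈ dvecs i s ↔ (u.length = i ∧ wsum u = s ∧ ∀ d ∈ u, 0 ≤ d ∧ d ≤ 3) := by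
  induction i with
  | zero =>
    intro s u
    by_cases h : s = 0
    · subst h
      constructor
      · intro hu; simp [dvecs] at hu; simp [hu, wsum]
      · rintro ⟨h1, _⟩
        have : u = [] := List.eq_nil_of_length_eq_zero h1
        simp [dvecs, this]
    · constructor
      · intro hu; simp [dvecs, h] at hu
      · rintro ⟨h1, h2, _⟩
        have : u = [] := List.eq_nil_of_length_eq_zero h1
        subst this
        simp [wsum] at h2
        omega
  | succ i ih =>
    intro s u
    constructor
    · intro hu
      rw [dvecs, List.mem_flatMap] at hu
      obtain ⟨d, hd, hmem⟩ := hu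
      rw [List.mem_filter] at hd
      obtain ⟨hdr, hds⟩ := hd
      rw [PySem.List.mem_pyRange_one] at hdr
      have hds' : d * ((i : Int) + 1) ≤ s := by simpa using hds
      rw [List.mem_map] at hmem
      obtain ⟨u', hu', rfl⟩ := hmem
      obtain ⟨hl, hw, hb⟩ := (ih (s - d * ((i : Int) + 1)) u').mp hu'
      refine ⟨by simp [hl], ?_, ?_⟩
      · rw [wsum_append, hl, hw]; ring
      · intro x hx
        rcases List.mem_append.mp hx with hx | hx
        · exact hb x hx
        · simp at hx; subst hx; omega
    · rintro ⟨hlen, hw, hb⟩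
      have hne : u ≠ [] := by intro h; subst h; simp at hlen
      rcases List.eq_nil_or_concat u with rfl | ⟨u', d, rfl⟩
      · simp at hlen
      · rw [List.concat_eq_append] at *
        have hl' : u'.length = i := by simpa using hlen
        have hdb := hb d (by simp)
        have hw' : wsum u' = s - d * ((i : Int) + 1) := by
          rw [wsum_append, hl'] at hw
          linarith
        have hnn : 0 ≤ wsum u' := wsum_nonneg u' (fun x hx => (hb x (by simp [hx])).1)
        have hle : d * ((i : Int) + 1) ≤ s := by linarith [hw'.symm.le]
        rw [dvecs, List.mem_flatMap]
        refine ⟨d, ?_, ?_⟩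
        · rw [List.mem_filter]
          refine ⟨?_, by simpa using hle⟩
          · rw [PySem.List.mem_pyRange_one]
            omega
        · rw [List.mem_map]
          exact ⟨u', (ih _ u').mpr ⟨hl', hw', fun x hx => hb x (by simp [hx])⟩, rfl⟩

theorem nodup_flatMap_cons (L : List Int) (F : Int → List (List Int)) (hL : L.Nodup)
    (hF : ∀ x, (F x).Nodup) : (L.flatMap (fun x => (F x).map (x :: ·))).Nodup := by
  induction L with
  | nil => simp
  | cons x L ihL =>
    simp only [List.flatMap_cons]
    rw [List.nodup_append]
    refine ⟨(hF x).map (fun a b h => by simpa using h), ihL (List.Nodup.of_cons hL), ?_⟩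
    intro z hz1 w hw
    rw [List.mem_map] at hz1
    obtain ⟨y, _, rfl⟩ := hz1
    rw [List.mem_flatMap] at hw
    obtain ⟨x', hx', hw⟩ := hw
    rw [List.mem_map] at hw
    obtain ⟨y', _, heq⟩ := hw
    rw [← heq]
    intro hcontr
    have hxy : x = x' ∧ y = y' := by simpa using hcontr
    exact (List.nodup_cons.mp hL).1 (hxy.1 ▸ hx')

theorem nodup_flatMap_concat (L : List Int) (F : Int → List (List Int)) (hL : L.Nodup)
    (hF : ∀ x, (F x).Nodup) : (L.flatMap (fun x => (F x).map (· ++ [x]))).Nodup := by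
  induction L with
  | nil => simp
  | cons x L ihL =>
    simp only [List.flatMap_cons]
    rw [List.nodup_append]
    refine ⟨(hF x).map (fun a b h => by simpa using h), ihL (List.Nodup.of_cons hL), ?_⟩
    intro z hz1 w hw
    rw [List.mem_map] at hz1
    obtain ⟨y, _, rfl⟩ := hz1
    rw [List.mem_flatMap] at hw
    obtain ⟨x', hx', hw⟩ := hw
    rw [List.mem_map] at hw
    obtain ⟨y', _, heq⟩ := hw
    rw [← heq]
    intro hcontr
    have hxx : x = x' := by
      have h2 := List.append_inj' hcontr (by simp)
      simpa using h2.2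
    exact (List.nodup_cons.mp hL).1 (hxx ▸ hx')

theorem nodup_chains (e : Nat) : ∀ (moon prev : Int), (chains e moon prev).Nodup := by
  induction e with
  | zero => intro moon prev; by_cases h : moon = 0 <;> simp [chains, h]
  | succ e ih =>
    intro moon prev
    rw [chains]
    exact nodup_flatMap_cons _ _ (PySem.List.nodup_pyRange_one _ _) (fun cur => ih (moon - cur) cur)

theorem nodup_dvecs (i : Nat) : ∀ (s : Int), (dvecs i s).Nodup := by
  induction i with
  | zero => intro s; by_cases h : s = 0 <;> simp [dvecs, h]
  | succ i ih =>
    intro s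
    rw [dvecs]
    exact nodup_flatMap_concat _ _ ((PySem.List.nodup_pyRange_one _ _).filter _)
      (fun d => ih (s - d * ((i : Int) + 1)))

-- ---- the difference transform phiT and its inverse psiT ----

theorem length_phiT : ∀ (z : List Int), (phiT z).length = z.length := by
  intro z
  induction z with
  | nil => rfl
  | cons a t ih =>
    cases t with
    | nil => rfl
    | cons b t' => simp only [phiT, List.length_cons] at ih ⊢; omega

theorem sum_phiT : ∀ (t : List Int) (a : Int), (phiT (a :: t)).sum = a := by
  intro t
  induction t with
  | nil => intro a; simp [phiT]
  | cons b t ih =>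
    intro a
    simp only [phiT, List.sum_cons, ih b]
    ring

theorem wsum_phiT : ∀ (z : List Int), wsum (phiT z) = z.sum := by
  intro z
  induction z with
  | nil => rfl
  | cons a t ih =>
    cases t with
    | nil => simp [phiT, wsum]
    | cons b t' =>
      simp only [phiT, wsum, List.sum_cons] at ih ⊢
      rw [sum_phiT]
      omega

theorem phiT_inj : Function.Injective phiT := by
  intro z1
  induction z1 with
  | nil =>
    intro z2 h
    have hl := length_phiT z2
    rw [← h] at hl
    simp [phiT] at hl
    exact (List.eq_nil_of_length_eq_zero (by omega)).symm
  | cons a t ih =>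
    intro z2 h
    cases z2 with
    | nil =>
      exfalso
      have := length_phiT (a :: t)
      rw [h] at this
      simp [phiT] at this
    | cons a2 t2 =>
      cases t with
      | nil =>
        cases t2 with
        | nil => simpa [phiT] using h
        | cons b2 t2' =>
          exfalso
          have h1 := length_phiT ([a] : List Int)
          have h2 := length_phiT (a2 :: b2 :: t2')
          rw [h] at h1
          rw [h2] at h1
          simp at h1
      | cons b t' =>
        cases t2 with
        | nil =>
          exfalso
          have h1 := length_phiT (a :: b :: t')
          rw [h] at h1
          rw [length_phiT ([a2] : List Int)] at h1
          simp at h1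
        | cons b2 t2' =>
          simp only [phiT, List.cons.injEq] at h
          obtain ⟨hh, htail⟩ := h
          have hbt := ih htail
          have hb : b = b2 ∧ t' = t2' := by simpa using hbt
          obtain ⟨hb1, hb2⟩ := hb
          subst hb1; subst hb2
          have ha : a = a2 := by omega
          rw [ha]

theorem psiT_ne_nil : ∀ (w : List Int), w ≠ [] → psiT w ≠ [] := by
  intro w hw
  cases w with
  | nil => exact absurd rfl hw
  | cons d w' =>
    cases w' with
    | nil => simp [psiT]
    | cons x t => simp [psiT]

theorem phiT_psiT : ∀ (w : List Int), w ≠ [] → phiT (psiT w) = w := by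
  intro w
  induction w with
  | nil => intro h; exact absurd rfl h
  | cons d w ih =>
    intro _
    cases w with
    | nil => rfl
    | cons w1 t =>
      have hne : psiT (w1 :: t) ≠ [] := psiT_ne_nil _ (by simp)
      obtain ⟨y, r, hyr⟩ := List.exists_cons_of_ne_nil hne
      have hip : phiT (psiT (w1 :: t)) = w1 :: t := ih (by simp)
      show phiT ((d + (psiT (w1 :: t)).headD 0) :: psiT (w1 :: t)) = d :: w1 :: t
      rw [hyr] at hip ⊢
      show phiT ((d + y) :: y :: r) = d :: w1 :: t
      simp only [phiT]
      rw [hip]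
      simp

-- step bounds transfer through the difference transform
theorem phiT_bounds : ∀ (t : List Int) (a : Int) (u : List Int) (k : Int),
    phiT (a :: t) = u ++ [k] →
    ((1 ≤ a ∧ ChainB a t) ↔ (1 ≤ k ∧ ∀ d ∈ u, 0 ≤ d ∧ d ≤ 3)) := by
  intro t
  induction t with
  | nil =>
    intro a u k h
    simp only [phiT] at h
    have hu : u = [] ∧ a = k := by
      cases u with
      | nil => simpa using h
      | cons x u' =>
        exfalso
        have := congrArg List.length h
        simp at this
    obtain ⟨rfl, rfl⟩ := hu
    simp [ChainB]
  | cons b t' ih =>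
    intro a u k h
    simp only [phiT] at h
    cases u with
    | nil =>
      exfalso
      simp only [List.nil_append] at h
      have := congrArg List.length h
      rw [List.length_cons, length_phiT] at this
      simp at this
    | cons d u' =>
      simp only [List.cons_append, List.cons.injEq] at h
      obtain ⟨hd, htail⟩ := h
      have hiff := ih b u' k htail
      constructor
      · rintro ⟨ha, hb1, hb2, hb3, hcb⟩
        obtain ⟨hk, hu'⟩ := hiff.mp ⟨hb3, hcb⟩
        refine ⟨hk, ?_⟩
        intro x hx
        rcases List.mem_cons.mp hx with rfl | hx
        · omega
        · exact hu' x hx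
      · rintro ⟨hk, hbd⟩
        have hdb := hbd d (by simp)
        obtain ⟨hb1, hcb⟩ := hiff.mpr ⟨hk, fun x hx => hbd x (by simp [hx])⟩
        refine ⟨by omega, by omega, by omega, hb1, hcb⟩

-- ---- the two enumerations and the bijection between them ----

theorem mem_LA (j : Nat) (n : Int) (z : List Int) :
    z ∈ LA j n ↔ ∃ f t, z = f :: t ∧ 1 ≤ f ∧ t.length = j ∧ ChainP f (n - f) t := by
  unfold LA
  rw [List.mem_flatMap]
  constructor
  · rintro ⟨f, hf, hz⟩
    rw [PySem.List.mem_pyRange_one] at hf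
    rw [List.mem_map] at hz
    obtain ⟨t, ht, rfl⟩ := hz
    obtain ⟨hlen, hP⟩ := (mem_chains j (n - f) f t).mp ht
    exact ⟨f, t, rfl, by omega, hlen, hP⟩
  · rintro ⟨f, t, rfl, hf, hlen, hP⟩
    have hle : (t.length : Int) ≤ n - f := chainP_len_le t f (n - f) hP
    refine ⟨f, ?_, ?_⟩
    · rw [PySem.List.mem_pyRange_one]
      constructor
      · exact hf
      · rw [hlen] at hle; omega
    · rw [List.mem_map]
      exact ⟨t, (mem_chains j (n - f) f t).mpr ⟨hlen, hP⟩, rfl⟩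

theorem mem_LB (j : Nat) (mI n : Int) (hm : 1 ≤ mI) (w : List Int) :
    w ∈ LB j mI n ↔ ∃ u k, w = u ++ [k] ∧ 1 ≤ k ∧ u.length = j ∧
      wsum u = n - mI * k ∧ (∀ d ∈ u, 0 ≤ d ∧ d ≤ 3) := by
  unfold LB
  rw [List.mem_flatMap]
  constructor
  · rintro ⟨k, hk, hw⟩
    rw [PySem.List.mem_pyRange_one] at hk
    rw [List.mem_map] at hw
    obtain ⟨u, hu, rfl⟩ := hw
    obtain ⟨hlen, hws, hb⟩ := (mem_dvecs j (n - mI * k) u).mp hu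
    exact ⟨u, k, rfl, by omega, hlen, hws, hb⟩
  · rintro ⟨u, k, rfl, hk, hlen, hws, hb⟩
    have hnn : 0 ≤ wsum u := wsum_nonneg u (fun x hx => (hb x hx).1)
    have hkf : k ≤ PySem.Int.floordiv n mI :=
      (PySem.Int.le_floordiv_iff_mul_le (by omega)).mpr (by nlinarith)
    refine ⟨k, ?_, ?_⟩
    · rw [PySem.List.mem_pyRange_one]
      omega
    · rw [List.mem_map]
      exact ⟨u, (mem_dvecs j (n - mI * k) u).mpr ⟨hlen, hws, hb⟩, rfl⟩

theorem phiT_maps (j : Nat) (n mI : Int) (hm : mI = (j : Int) + 1) (z : List Int)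
    (hz : z ∈ LA j n) : phiT z ∈ LB j mI n := by
  obtain ⟨f, t, rfl, hf, hlen, hP⟩ := (mem_LA j n z).mp hz
  obtain ⟨hsum, hcb⟩ := (chainP_iff t f (n - f)).mp hP
  have hne : phiT (f :: t) ≠ [] := by
    intro h
    have := length_phiT (f :: t)
    rw [h] at this
    simp at this
  rcases List.eq_nil_or_concat (phiT (f :: t)) with h | ⟨u, k, huk⟩
  · exact absurd h hne
  · rw [List.concat_eq_append] at huk
    rw [huk]
    rw [mem_LB j mI n (by omega)]
    have hbk := (phiT_bounds t f u k huk).mp ⟨hf, hcb⟩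
    have hul : u.length = j := by
      have := length_phiT (f :: t)
      rw [huk] at this
      simp [hlen] at this
      omega
    have hws : wsum u = n - mI * k := by
      have h1 : wsum (phiT (f :: t)) = (f :: t).sum := wsum_phiT (f :: t)
      rw [huk, wsum_append, hul] at h1
      simp [List.sum_cons, hsum] at h1
      rw [hm]
      omega
    exact ⟨u, k, rfl, hbk.1, hul, hws, hbk.2⟩

theorem psiT_maps (j : Nat) (n mI : Int) (hm : mI = (j : Int) + 1) (w : List Int)
    (hw : w ∈ LB j mI n) : psiT w ∈ LA j n ∧ phiT (psiT w) = w := by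
  obtain ⟨u, k, rfl, hk, hlen, hws, hb⟩ := (mem_LB j mI n (by omega) w).mp hw
  have hwne : u ++ [k] ≠ [] := by simp
  have hphi : phiT (psiT (u ++ [k])) = u ++ [k] := phiT_psiT _ hwne
  refine ⟨?_, hphi⟩
  have hzne : psiT (u ++ [k]) ≠ [] := psiT_ne_nil _ hwne
  obtain ⟨a, t, hat⟩ := List.exists_cons_of_ne_nil hzne
  rw [hat]
  rw [hat] at hphi
  rw [mem_LA]
  have hbk := (phiT_bounds t a u k hphi).mpr ⟨hk, hb⟩
  have hsum : (a :: t).sum = n := by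
    have h1 : wsum (phiT (a :: t)) = (a :: t).sum := wsum_phiT (a :: t)
    rw [hphi, wsum_append, hlen] at h1
    rw [← h1, hws, hm]
    ring
  have htlen : t.length = j := by
    have := length_phiT (a :: t)
    rw [hphi] at this
    simp [hlen] at this
    omega
  refine ⟨a, t, rfl, hbk.1, htlen, ?_⟩
  rw [chainP_iff]
  refine ⟨?_, hbk.2⟩
  simp [List.sum_cons] at hsum
  omega

theorem LA_LB_length (j : Nat) (n mI : Int) (hm : mI = (j : Int) + 1) :
    (LA j n).length = (LB j mI n).length := by
  have hnA : (LA j n).Nodup := by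
    unfold LA
    exact nodup_flatMap_cons _ _ (PySem.List.nodup_pyRange_one _ _)
      (fun f => nodup_chains j (n - f) f)
  have hnB : (LB j mI n).Nodup := by
    unfold LB
    exact nodup_flatMap_concat _ _ (PySem.List.nodup_pyRange_one _ _)
      (fun k => nodup_dvecs j (n - mI * k))
  have hnM : ((LA j n).map phiT).Nodup := hnA.map phiT_inj
  have hmem : ∀ w, w ∈ (LA j n).map phiT ↔ w ∈ LB j mI n := by
    intro w
    constructor
    · intro hw
      rw [List.mem_map] at hw
      obtain ⟨z, hz, rfl⟩ := hw
      exact phiT_maps j n mI hm z hz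
    · intro hw
      rw [List.mem_map]
      obtain ⟨h1, h2⟩ := psiT_maps j n mI hm w hw
      exact ⟨psiT w, h1, h2⟩
  have hfs : ((LA j n).map phiT).toFinset = (LB j mI n).toFinset := by
    apply Finset.ext
    intro w
    rw [List.mem_toFinset, List.mem_toFinset]
    exact hmem w
  calc (LA j n).length = ((LA j n).map phiT).length := by rw [List.length_map]
    _ = ((LA j n).map phiT).toFinset.card := (List.toFinset_card_of_nodup hnM).symm
    _ = (LB j mI n).toFinset.card := by rw [hfs]
    _ = (LB j mI n).length := List.toFinset_card_of_nodup hnB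

-- ---- totals ----

theorem LA_total (j : Nat) (n : Int) :
    ((PySem.List.pyRange 1 (n - (j : Int) + 1) 1).map (fun f => gSpec j (n - f) f)).sum
      = ((LA j n).length : Int) := by
  unfold LA
  rw [List.length_flatMap, Nat.cast_list_sum, List.map_map]
  congr 1
  refine List.map_congr_left ?_
  intro f _
  simp [gSpec_len]

theorem LB_total (j : Nat) (mI n : Int) :
    ((PySem.List.pyRange 1 (PySem.Int.floordiv n mI + 1) 1).map
      (fun k => W j (n - mI * k))).sum = ((LB j mI n).length : Int) := by
  unfold LB
  rw [List.length_flatMap, Nat.cast_list_sum, List.map_map]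
  congr 1
  refine List.map_congr_left ?_
  intro k _
  simp [W_len]

theorem solve_eq_alt (m n : Int) (hP : Pre_solve m n) : solve m n = solve_alt m n := by
  rw [solveA_eq]
  by_cases hm : 1 ≤ m
  · by_cases hn : n < m
    · have hA : PySem.List.pyRange 1 (n - (m - 1) + 1) 1 = [] :=
        PySem.List.pyRange_one_eq_nil (by omega)
      unfold solve_alt
      rw [if_pos (by simp; omega)]
      simp [hA]
    · rw [not_lt] at hn
      rw [solveB_eq m n hm hn]
      set j : Nat := (m - 1).toNat with hj
      have hjm : (j : Int) = m - 1 := by omega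
      have hbound : n - (m - 1) + 1 = n - (j : Int) + 1 := by omega
      rw [hbound, LA_total j n, LA_LB_length j n m (by omega), ← LB_total j m n]
  · rcases hP with h | h
    · omega
    · have hA : PySem.List.pyRange 1 (n - (m - 1) + 1) 1 = [] :=
        PySem.List.pyRange_one_eq_nil (by omega)
      unfold solve_alt
      rw [if_pos (by simp; omega)]
      simp [hA]

-- ===== VERDICT (by name: the statement is the Claim_ definition above) =====
theorem solve_spec : Claim_equal_solve := by
  intro m n _ hP
  unfold Spec_solve
  exact solve_eq_alt m n hP
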